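-- pv_equiv track=rewrite | github.com/versi-regular/rule-based_syllabifier_sr | syllabifier.py | get_syllable_structure
-- ===== SOURCE A (Python) =====
-- def get_syllable_structure(word, syllabified_word, nuclei_positions):
-- 	"""Returns the CV syllable structure of a syllabified word."""
--
-- 	separator_positions = [v for v, letter in enumerate(syllabified_word) if letter == "-"]
--
-- 	word_list = list(word)
--
-- 	for i in range(len(word_list)):
-- 		if i in nuclei_positions:
-- 			word_list[i] = "V"
-- 		else:
-- 			word_list[i] ="C"
--
-- 	for position in separator_positions:
-- 		word_list.insert(position, "-")
--
-- 	return "".join(word_list)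
-- ===== SOURCE B (Python) =====
-- def get_syllable_structure(word, syllabified_word, nuclei_positions):
--     """Returns the CV syllable structure of a syllabified word."""
--     nuclei = set(nuclei_positions)
--     cv = ["V" if i in nuclei else "C" for i in range(len(word))]
--     out = []
--     ci = 0
--     for pos, letter in enumerate(syllabified_word):
--         if letter == "-":
--             while len(out) < pos and ci < len(cv):
--                 out.append(cv[ci])
--                 ci += 1
--             out.append("-")
--     out.extend(cv[ci:])
--     return "".join(out)
-- ===== Notes on version B (the rewrite author's own statement) =====
-- stated objective: faster
-- what changed: A assigns C/V in place with a linear 'i in nuclei_positions' scan per letter and then calls list.insert once per dash, shifting the tail each time; B builds the CV list once from a set of nuclei and merges the dashes in a single two-cursor forward pass over the syllabified word, appending only, never shifting or rescanning.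
import Mathlib
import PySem

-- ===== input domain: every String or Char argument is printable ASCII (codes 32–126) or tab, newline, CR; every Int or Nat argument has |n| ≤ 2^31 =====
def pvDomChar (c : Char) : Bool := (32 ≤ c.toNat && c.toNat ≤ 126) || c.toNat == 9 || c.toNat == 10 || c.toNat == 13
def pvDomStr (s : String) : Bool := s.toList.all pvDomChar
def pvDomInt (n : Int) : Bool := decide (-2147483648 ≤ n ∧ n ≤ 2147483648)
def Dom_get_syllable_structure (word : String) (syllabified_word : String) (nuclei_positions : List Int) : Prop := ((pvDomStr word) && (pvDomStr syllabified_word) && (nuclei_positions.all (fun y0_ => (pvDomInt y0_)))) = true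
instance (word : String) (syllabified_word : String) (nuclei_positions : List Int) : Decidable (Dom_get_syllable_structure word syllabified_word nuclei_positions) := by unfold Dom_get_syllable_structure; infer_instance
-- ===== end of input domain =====

-- B replaces A's per-letter membership scan and repeated list.insert mutation by a CV list
-- built from a set plus one two-cursor merge pass; objective: faster.

-- ===== PORT A =====
def get_syllable_structure (word : String) (syllabified_word : String) (nuclei_positions : List Int) : String :=
  let separator_positions : List Int :=
    ((PySem.List.enumerate syllabified_word.toList 0).filter (fun vl => vl.2 == '-')).map (fun vl => vl.1)
  let word_list0 : List Char := word.toList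
  -- for i in range(len(word_list)): word_list[i] = 'V'/'C'
  let word_list1 : List Char :=
    (PySem.List.pyRange 0 (word_list0.length : Int) 1).foldl
      (fun wl i => PySem.List.pySetD wl i (if nuclei_positions.contains i then 'V' else 'C')) word_list0
  -- for position in separator_positions: word_list.insert(position, '-')
  let word_list2 : List Char :=
    separator_positions.foldl (fun wl position => PySem.List.insert wl position '-') word_list1
  String.mk word_list2

-- ===== PORT B =====
-- the inner 'while len(out) < pos and ci < len(cv)' loop of B
def pvCopy (cvs : List Char) (p : Int) (out : List Char) (ci : Nat) : List Char × Nat :=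
  if h : (out.length : Int) < p ∧ ci < cvs.length then
    pvCopy cvs p (out ++ [cvs[ci]!]) (ci + 1)
  else (out, ci)
termination_by cvs.length - ci
decreasing_by omega

def get_syllable_structure_alt (word : String) (syllabified_word : String) (nuclei_positions : List Int) : String :=
  let nuclei : PySem.Set Int := PySem.Set.ofList nuclei_positions
  let cvs : List Char :=
    (PySem.List.pyRange 0 (word.toList.length : Int) 1).map
      (fun i => if PySem.Set.contains nuclei i then 'V' else 'C')
  -- for pos, letter in enumerate(syllabified_word): …  state: (out, ci)
  let st : List Char × Nat :=
    (PySem.List.enumerate syllabified_word.toList 0).foldl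
      (fun (st : List Char × Nat) pl =>
        if pl.2 == '-' then
          let st' := pvCopy cvs pl.1 st.1 st.2
          (st'.1 ++ ['-'], st'.2)
        else st)
      ([], 0)
  String.mk (st.1 ++ cvs.drop st.2)

-- ===== PRECONDITION & SPEC =====
def Spec_get_syllable_structure (word : String) (syllabified_word : String) (nuclei_positions : List Int) (out : String) : Prop := out = get_syllable_structure_alt word syllabified_word nuclei_positions
instance (word : String) (syllabified_word : String) (nuclei_positions : List Int) (out : String) : Decidable (Spec_get_syllable_structure word syllabified_word nuclei_positions out) := by unfold Spec_get_syllable_structure; infer_instance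

-- ===== CLAIM (what is proved, stated in full; the proofs are below) =====
def Claim_equal_get_syllable_structure : Prop := ∀ (word : String) (syllabified_word : String) (nuclei_positions : List Int), Dom_get_syllable_structure word syllabified_word nuclei_positions → Spec_get_syllable_structure word syllabified_word nuclei_positions (get_syllable_structure word syllabified_word nuclei_positions)

-- ===== LEMMAS AND PROOFS =====

-- the tail of B's computation, started at an arbitrary state
def pvB (cvs : List Char) (ps : List Int) (out : List Char) (ci : Nat) : List Char :=
  match ps with
  | [] => out ++ cvs.drop ci
  | p :: rest =>
      let st := pvCopy cvs p out ci
      pvB cvs rest (st.1 ++ ['-']) st.2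

-- Python list.insert at a nonnegative position clamps to the length
theorem pv_insert_clamp {α : Type} (xs : List α) (p : Int) (v : α) (hp : 0 ≤ p) :
    PySem.List.insert xs p v
      = xs.take (min p.toNat xs.length) ++ v :: xs.drop (min p.toNat xs.length) := by
  have h2 : (min p (xs.length:Int)).toNat = min p.toNat xs.length := by omega
  simp [PySem.List.insert, PySem.List.sliceIndices, not_lt.mpr hp, h2]

-- inserting past a fixed prefix leaves the prefix alone
theorem pv_insert_append {α : Type} (acc b : List α) (p : Int) (v : α)
    (hp : (acc.length : Int) ≤ p) :
    PySem.List.insert (acc ++ b) p v = acc ++ PySem.List.insert b (p - acc.length) v := by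
  have hp0 : 0 ≤ p := le_trans (by positivity) hp
  rw [pv_insert_clamp _ _ _ hp0, pv_insert_clamp _ _ _ (by omega)]
  have hK : min p.toNat (acc ++ b).length = acc.length + min (p - acc.length).toNat b.length := by
    simp [List.length_append]; omega
  rw [hK, List.take_append, List.drop_append]
  rw [List.take_of_length_le (Nat.le_add_right _ _), List.drop_eq_nil_of_le (Nat.le_add_right _ _)]
  simp

theorem pv_take_set (wl : List Char) (a : Nat) (c : Char) (h : a < wl.length) :
    (wl.set a c).take (a+1) = wl.take a ++ [c] := by
  rw [List.set_eq_take_append_cons_drop, if_pos h, List.take_append]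
  simp [List.take_take, List.length_take, Nat.min_eq_left h.le]

-- the V/C assignment loop rewrites every position: it is the map over the index range
theorem pv_setloop (f : Int → Char) (nn : Nat) :
    ∀ (k a : Nat) (wl : List Char), a + k = wl.length → wl.length = nn →
    (PySem.List.pyRange (a : Int) (nn : Int) 1).foldl
        (fun wl i => PySem.List.pySetD wl i (f i)) wl
      = wl.take a ++ (PySem.List.pyRange (a : Int) (nn : Int) 1).map f := by
  intro k
  induction k with
  | zero =>
    intro a wl h hn
    rw [PySem.List.pyRange_one_eq_nil (by omega)]
    simp [List.take_of_length_le (by omega : wl.length ≤ a)]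
  | succ k ih =>
    intro a wl h hn
    have hlt : (a : Int) < (nn : Int) := by omega
    rw [PySem.List.pyRange_one_cons hlt]
    simp only [List.foldl_cons, List.map_cons]
    have ha : a < wl.length := by omega
    have hset : PySem.List.pySetD wl (a:Int) (f (a:Int)) = wl.set a (f (a:Int)) := by
      simp [PySem.List.pySetD, PySem.List.pySet?_natCast wl a (f (a:Int)) ha]
    rw [hset]
    have hcast : ((a:Int) + 1) = ((a + 1 : Nat) : Int) := by push_cast; ring
    rw [hcast, ih (a+1) (wl.set a (f (a:Int))) (by simp; omega) (by simp [hn])]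
    rw [pv_take_set wl a _ ha]
    simp

theorem pv_setloop0 (f : Int → Char) (wl : List Char) :
    (PySem.List.pyRange 0 (wl.length : Int) 1).foldl
        (fun wl i => PySem.List.pySetD wl i (f i)) wl
      = (PySem.List.pyRange 0 (wl.length : Int) 1).map f := by
  have h := pv_setloop f wl.length wl.length 0 wl (by omega) rfl
  simpa using h

-- the while loop copies exactly min(p - len(out), len(cvs) - ci) letters
theorem pv_copy_eq (cvs : List Char) (p : Int) :
    ∀ (fuel : Nat) (out : List Char) (ci : Nat), cvs.length - ci ≤ fuel →
    pvCopy cvs p out ci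
      = (out ++ (cvs.drop ci).take (min (p - out.length).toNat (cvs.length - ci)),
         ci + min (p - out.length).toNat (cvs.length - ci)) := by
  intro fuel
  induction fuel with
  | zero =>
    intro out ci hf
    rw [pvCopy]
    rw [dif_neg (by omega)]
    have h0 : min (p - out.length).toNat (cvs.length - ci) = 0 := by omega
    rw [h0]
    simp
  | succ fuel ih =>
    intro out ci hf
    rw [pvCopy]
    by_cases hc : (out.length : Int) < p ∧ ci < cvs.length
    · rw [dif_pos hc]
      rw [ih (out ++ [cvs[ci]!]) (ci + 1) (by omega)]
      have hget : cvs[ci]! = cvs[ci]'hc.2 := by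
        simp [List.getElem!_eq_getElem?_getD, List.getElem?_eq_getElem hc.2]
      have hk : min (p - (out ++ [cvs[ci]!]).length).toNat (cvs.length - (ci + 1)) + 1
          = min (p - out.length).toNat (cvs.length - ci) := by
        simp only [List.length_append, List.length_cons, List.length_nil]
        omega
      rw [Prod.mk.injEq]
      refine ⟨?_, by omega⟩
      rw [← hk]
      have hdrop : cvs.drop ci = cvs[ci]'hc.2 :: cvs.drop (ci + 1) :=
        List.drop_eq_getElem_cons hc.2
      rw [hdrop, List.take_succ_cons, hget]
      simp
    · rw [dif_neg hc]
      have h0 : min (p - out.length).toNat (cvs.length - ci) = 0 := by omega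
      rw [h0]
      simp

-- the insert cascade, started past an already-built prefix, equals B's tail
theorem pv_main (cvs : List Char) :
    ∀ (ps : List Int), ps.Pairwise (· < ·) →
    ∀ (ci : Nat) (acc : List Char), ci ≤ cvs.length → (∀ p ∈ ps, (acc.length : Int) ≤ p) →
    ps.foldl (fun wl p => PySem.List.insert wl p '-') (acc ++ cvs.drop ci)
      = pvB cvs ps acc ci := by
  intro ps
  induction ps with
  | nil => intro _ ci acc _ _; simp [pvB]
  | cons p rest ih =>
    intro hpw ci acc hci hb
    have hp : (acc.length : Int) ≤ p := hb p (by simp)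
    simp only [List.foldl_cons]
    rw [pv_insert_append acc (cvs.drop ci) p '-' hp,
        pv_insert_clamp _ _ _ (by omega)]
    set k := min (p - (acc.length:Int)).toNat (cvs.drop ci).length with hkdef
    have hkl : (cvs.drop ci).length = cvs.length - ci := by simp
    have hdd : (cvs.drop ci).drop k = cvs.drop (ci + k) := by rw [List.drop_drop]
    have harr : acc ++ ((cvs.drop ci).take k ++ '-' :: (cvs.drop ci).drop k)
        = (acc ++ (cvs.drop ci).take k ++ ['-']) ++ cvs.drop (ci + k) := by
      simp [hdd]
    rw [harr]
    have hklen : k ≤ cvs.length - ci := by omega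
    have hlen' : (acc ++ (cvs.drop ci).take k ++ ['-']).length = acc.length + k + 1 := by
      simp [List.length_take]; omega
    rw [ih (List.Pairwise.sublist (List.sublist_cons_self p rest) hpw) (ci + k)
          (acc ++ (cvs.drop ci).take k ++ ['-']) (by omega)
          (by
            intro q hq
            have hpq : p < q := (List.pairwise_cons.mp hpw).1 q hq
            rw [hlen']
            push_cast
            omega)]
    -- match B's unfolding
    conv_rhs => rw [pvB]
    rw [pv_copy_eq cvs p cvs.length acc ci (by omega)]
    rw [hkl] at hkdef
    rw [← hkdef]

-- B's fold over the enumerated word, assembled, is pvB of the dash positions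
theorem pv_bfold (cvs : List Char) :
    ∀ (l : List (Int × Char)) (out : List Char) (ci : Nat),
    (let st := l.foldl
        (fun (st : List Char × Nat) pl =>
          if pl.2 == '-' then
            ((pvCopy cvs pl.1 st.1 st.2).1 ++ ['-'], (pvCopy cvs pl.1 st.1 st.2).2)
          else st)
        (out, ci)
     st.1 ++ cvs.drop st.2)
      = pvB cvs ((l.filter (fun pl => pl.2 == '-')).map (fun pl => pl.1)) out ci := by
  intro l
  induction l with
  | nil => intro out ci; simp [pvB]
  | cons hd tl ih =>
    intro out ci
    by_cases hdash : hd.2 = '-'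
    · simp only [List.foldl_cons, List.filter_cons, hdash, beq_self_eq_true, if_pos,
        List.map_cons]
      rw [pvB]
      exact ih ((pvCopy cvs hd.1 out ci).1 ++ ['-']) (pvCopy cvs hd.1 out ci).2
    · simp only [List.foldl_cons, List.filter_cons]
      rw [if_neg (by simpa using hdash), if_neg (by simpa using hdash)]
      exact ih out ci

-- ===== VERDICT (by name: the statement is the Claim_ definition above) =====
theorem get_syllable_structure_spec : Claim_equal_get_syllable_structure := by
  intro word sw nuc _
  unfold Spec_get_syllable_structure
  simp only [get_syllable_structure, get_syllable_structure_alt]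
  rw [pv_setloop0 (fun i => if nuc.contains i then 'V' else 'C') word.toList]
  have hfeq : (fun i => if PySem.Set.contains (PySem.Set.ofList nuc) i then 'V' else 'C')
      = (fun i => if nuc.contains i then 'V' else 'C') := by
    funext i
    have hc : PySem.Set.contains (PySem.Set.ofList nuc) i = nuc.contains i := by
      rw [Bool.eq_iff_iff]
      simp [PySem.Set.mem_ofList]
    rw [hc]
  rw [hfeq]
  set f : Int → Char := fun i => if nuc.contains i then 'V' else 'C' with hf
  set cvs : List Char := (PySem.List.pyRange 0 (word.toList.length : Int) 1).map f with hcvs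
  set ps : List Int :=
    ((PySem.List.enumerate sw.toList 0).filter (fun vl => vl.2 == '-')).map (fun vl => vl.1) with hps
  have hpw : ps.Pairwise (· < ·) := by
    rw [hps, List.pairwise_map]
    exact (PySem.List.pairwise_lt_enumerate _ _).filter _
  have hnn : ∀ q ∈ ps, (0:Int) ≤ q := by
    intro q hq
    rw [hps] at hq
    simp only [List.mem_map, List.mem_filter] at hq
    obtain ⟨pl, ⟨hmem, _⟩, hq1⟩ := hq
    rw [PySem.List.mem_enumerate_iff] at hmem
    obtain ⟨kk, hklt, hpl⟩ := hmem
    rw [← hq1, hpl]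
    simp
  have hA := pv_main cvs ps hpw 0 [] (by omega) (by intro q hq; simpa using hnn q hq)
  simp only [List.drop_zero, List.nil_append] at hA
  rw [hA]
  rw [← pv_bfold cvs (PySem.List.enumerate sw.toList 0) [] 0]
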